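-- pv_equiv track=rewrite | github.com/jl908069/gum_sum_salience | score.py | find_coref_chain
-- ===== SOURCE A (Python) =====
-- def find_coref_chain(start_tuple, file_result, used_indices):
--     chain = [start_tuple[0]]  # Start with the word span of the first tuple
--     current_word_index = start_tuple[1].split(',')[0].strip()  # Only use the first word index
--     current_coref_indices = [ci.strip() for ci in start_tuple[2].split(',')]
--
--     while True:
--         found = False
--         for tup in file_result:
--             if tup in used_indices:
--                 continue
--
--             words, word_indices, coref_indices = tup
--             first_word_index = word_indices.split(',')[0].strip()  # Only check the first index
--             coref_indices_list = [ci.strip() for ci in coref_indices.split(',')]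
--
--             if first_word_index in current_coref_indices:
--                 chain.append(words)
--                 used_indices.add(tup)
--                 current_word_index = first_word_index
--                 current_coref_indices = coref_indices_list
--                 found = True
--                 break
--
--         if not found:
--             break
--
--     return tuple(chain)
-- ===== SOURCE B (Python) =====
-- def find_coref_chain(start_tuple, file_result, used_indices):
--     # Index tuples by their first word index once; each chain step takes the
--     # earliest (lowest-position) unused tuple among the buckets of the current
--     # coref indices.  Tuples already used on entry can never be selected, so
--     # they are not indexed.  Mutates used_indices like the original.
--     buckets = {}
--     for pos, tup in enumerate(file_result):
--         if tup in used_indices: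
--             continue
--         words, word_indices, coref_indices = tup
--         key = word_indices.split(',')[0].strip()
--         buckets.setdefault(key, []).append((pos, tup))
--     chain = [start_tuple[0]]
--     current = [ci.strip() for ci in start_tuple[2].split(',')]
--     while True:
--         best = None
--         for ci in current:
--             for pos, tup in buckets.get(ci, []):
--                 if tup not in used_indices:
--                     if best is None or pos < best[0]:
--                         best = (pos, tup)
--                     break
--         if best is None:
--             return tuple(chain)
--         pos, tup = best
--         chain.append(tup[0])
--         used_indices.add(tup)
--         current = [ci.strip() for ci in tup[2].split(',')]
-- ===== Notes on version B (the rewrite author's own statement) =====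
-- stated objective: alternative
-- what changed: Instead of rescanning the whole file_result list (re-splitting every tuple's index strings) on every chain step, B builds a dict from first word index to the (position, tuple) pairs bearing it once, and each step picks the earliest unused tuple among the buckets of the current coref indices; it trades one up-front indexing pass for not rescanning non-matching tuples per step.
import Mathlib
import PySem

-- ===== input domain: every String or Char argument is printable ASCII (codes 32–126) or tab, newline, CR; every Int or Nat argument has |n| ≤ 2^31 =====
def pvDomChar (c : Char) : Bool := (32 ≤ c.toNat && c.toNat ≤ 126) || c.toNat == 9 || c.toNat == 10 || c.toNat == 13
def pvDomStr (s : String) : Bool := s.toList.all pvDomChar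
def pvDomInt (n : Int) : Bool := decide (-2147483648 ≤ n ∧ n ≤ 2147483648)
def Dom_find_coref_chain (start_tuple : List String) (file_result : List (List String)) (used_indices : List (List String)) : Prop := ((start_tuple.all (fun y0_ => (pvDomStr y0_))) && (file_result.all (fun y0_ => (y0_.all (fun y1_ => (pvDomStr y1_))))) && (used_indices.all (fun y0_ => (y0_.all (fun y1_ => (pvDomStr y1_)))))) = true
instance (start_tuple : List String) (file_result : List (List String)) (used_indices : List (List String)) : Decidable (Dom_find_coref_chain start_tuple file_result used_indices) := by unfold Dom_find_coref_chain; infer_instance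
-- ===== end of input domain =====

-- B replaces A's full rescan (with re-splitting) per chain step by a one-pass dict
-- from first word index to (position, tuple) buckets; each step takes the earliest
-- unused tuple among the current coref indices' buckets (alternative algorithm, same cost on short chains).
-- Both Pythons mutate used_indices identically; the equivalence proved is about the return value.

-- ===== PORT A =====
-- first_word_index = word_indices.split(',')[0].strip() ; coref list = [ci.strip() for ci in s.split(',')]
def pvA_firstIdx (word_indices : String) : String :=
  PySem.Str.strip (((PySem.Str.split? word_indices ",").getD []).headD "")

def pvA_corefs (s : String) : List String :=
  ((PySem.Str.split? s ",").getD []).map PySem.Str.strip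

-- the body of A's inner 'for tup in file_result' scan: skip used, unpack, test membership
-- (a tuple that is not a triple would make Python's unpack raise; Pre_ excludes that, the port tests false)
def pvA_match (used : PySem.Set (List String)) (current : List String) (tup : List String) : Bool :=
  !PySem.Set.contains used tup &&
    (match tup with
     | [_, word_indices, _] => current.contains (pvA_firstIdx word_indices)
     | _ => false)

-- the 'while True' loop; each successful pass consumes one unused tuple of file_result,
-- so fuel = file_result.length + 1 always suffices
def pvA_loop (file_result : List (List String)) :
    Nat → PySem.Set (List String) → List String → List String → List String
  | 0, _, _, chain => chain
  | fuel + 1, used, current, chain =>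
    match file_result.find? (pvA_match used current) with
    | none => chain
    | some tup =>
        pvA_loop file_result fuel (PySem.Set.add used tup)
          (pvA_corefs (tup.getD 2 "")) (chain ++ [tup.getD 0 ""])

def find_coref_chain (start_tuple : List String) (file_result : List (List String)) (used_indices : List (List String)) : List String :=
  let chain := [start_tuple.getD 0 ""]
  let _current_word_index := pvA_firstIdx (start_tuple.getD 1 "")  -- assigned, never read (as in A)
  let current := pvA_corefs (start_tuple.getD 2 "")
  pvA_loop file_result (file_result.length + 1) used_indices current chain

-- ===== PORT B =====
def pvB_key (word_indices : String) : String :=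
  PySem.Str.strip (((PySem.Str.split? word_indices ",").getD []).headD "")

def pvB_corefs (s : String) : List String :=
  ((PySem.Str.split? s ",").getD []).map PySem.Str.strip

-- buckets.setdefault(key, []).append((pos, tup)) over enumerate(file_result),
-- skipping tuples already used on entry
-- (Python's unpack raises on a non-triple; Pre_ excludes that, the port skips it)
def pvB_buckets (file_result : List (List String)) (used_indices : PySem.Set (List String)) : PySem.Dict String (List (Int × List String)) :=
  (PySem.List.enumerate file_result 0).foldl
    (fun d e =>
      if PySem.Set.contains used_indices e.2 then d
      else
        match e.2 with
        | [_, word_indices, _] =>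
            let k := pvB_key word_indices
            d.insert k (d.getD k [] ++ [e])
        | _ => d)
    PySem.Dict.empty

-- one pass of B's 'for ci in current' selection: per bucket the first unused entry, keep the lowest position
def pvB_step (buckets : PySem.Dict String (List (Int × List String)))
    (used : PySem.Set (List String)) (current : List String) : Option (Int × List String) :=
  current.foldl
    (fun best ci =>
      match (buckets.getD ci []).find? (fun e => !PySem.Set.contains used e.2) with
      | none => best
      | some e =>
          match best with
          | none => some e
          | some b => if e.1 < b.1 then some e else some b)
    none

def pvB_loop (buckets : PySem.Dict String (List (Int × List String))) :
    Nat → PySem.Set (List String) → List String → List String → List String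
  | 0, _, _, chain => chain
  | fuel + 1, used, current, chain =>
    match pvB_step buckets used current with
    | none => chain
    | some e =>
        pvB_loop buckets fuel (PySem.Set.add used e.2)
          (pvB_corefs (e.2.getD 2 "")) (chain ++ [e.2.getD 0 ""])

def find_coref_chain_alt (start_tuple : List String) (file_result : List (List String)) (used_indices : List (List String)) : List String :=
  let buckets := pvB_buckets file_result used_indices
  let chain := [start_tuple.getD 0 ""]
  let current := pvB_corefs (start_tuple.getD 2 "")
  pvB_loop buckets (file_result.length + 1) used_indices current chain

-- ===== PRECONDITION & SPEC =====
-- Pre_ excludes exactly the inputs where both Pythons raise: a start_tuple with fewer than 3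
-- components (IndexError) or a file_result tuple that is not a triple and is not already used
-- (ValueError on unpack: in A's final full pass, in B's indexing pass).
def Pre_find_coref_chain (start_tuple : List String) (file_result : List (List String)) (used_indices : List (List String)) : Prop :=
  3 ≤ start_tuple.length ∧ ∀ t ∈ file_result, t.length = 3 ∨ t ∈ used_indices
instance (start_tuple : List String) (file_result : List (List String)) (used_indices : List (List String)) : Decidable (Pre_find_coref_chain start_tuple file_result used_indices) := by unfold Pre_find_coref_chain; infer_instance

def pvWitness_find_coref_chain : List String × List (List String) × List (List String) :=
  (["a", "0", "1"], [["b", "1, 9", "2"], ["c", "2", "3"]], [])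

def Spec_find_coref_chain (start_tuple : List String) (file_result : List (List String)) (used_indices : List (List String)) (out : List String) : Prop := out = find_coref_chain_alt start_tuple file_result used_indices
instance (start_tuple : List String) (file_result : List (List String)) (used_indices : List (List String)) (out : List String) : Decidable (Spec_find_coref_chain start_tuple file_result used_indices out) := by unfold Spec_find_coref_chain; infer_instance

-- ===== CLAIM (what is proved, stated in full; the proofs are below) =====
def Claim_equal_find_coref_chain : Prop := ∀ (start_tuple : List String) (file_result : List (List String)) (used_indices : List (List String)), Dom_find_coref_chain start_tuple file_result used_indices → Pre_find_coref_chain start_tuple file_result used_indices → Spec_find_coref_chain start_tuple file_result used_indices (find_coref_chain start_tuple file_result used_indices)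

-- ===== LEMMAS AND PROOFS =====

-- the first word index of a triple, none for any other shape
def pvKeyOf? : List String → Option String
  | [_, wi, _] => some (pvB_key wi)
  | _ => none

-- the predicate a bucket lookup at key ci realises
def pvKeyB (t : List String) (ci : String) : Bool :=
  match pvKeyOf? t with
  | some k => k == ci
  | none => false

-- the key-membership half of A's test, through pvKeyOf?
def pvAny (current : List String) (t : List String) : Bool :=
  match pvKeyOf? t with
  | some k => current.contains k
  | none => false

-- B's best-update, named so the fold can be rewritten
def pvComb (best c : Option (Int × List String)) : Option (Int × List String) :=
  match c with
  | none => best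
  | some e =>
    match best with
    | none => some e
    | some b => if e.1 < b.1 then some e else some b

lemma pvComb_none (b : Option (Int × List String)) : pvComb b none = b := rfl
lemma pvComb_none_some (e : Int × List String) : pvComb none (some e) = some e := rfl
lemma pvComb_some_some (b e : Int × List String) :
    pvComb (some b) (some e) = if e.1 < b.1 then some e else some b := rfl

lemma pvA_match_eq (used : PySem.Set (List String)) (current : List String) (t : List String) :
    pvA_match used current t = (!PySem.Set.contains used t && pvAny current t) := by
  rcases t with _ | ⟨a, _ | ⟨b, _ | ⟨c, _ | ⟨d, t⟩⟩⟩⟩ <;> rfl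

lemma pvB_buckets_fn (d : PySem.Dict String (List (Int × List String))) (e : Int × List String) :
    (match e.2 with
     | [_, word_indices, _] =>
         let k := pvB_key word_indices
         d.insert k (d.getD k [] ++ [e])
     | _ => d)
    = match pvKeyOf? e.2 with
      | some k => d.insert k (d.getD k [] ++ [e])
      | none => d := by
  obtain ⟨i, t⟩ := e
  rcases t with _ | ⟨a, _ | ⟨b, _ | ⟨c, _ | ⟨x, t⟩⟩⟩⟩ <;> rfl

lemma pvBuckets_fold (u0 : PySem.Set (List String)) (L : List (Int × List String)) (d : PySem.Dict String (List (Int × List String))) (k : String) :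
    (L.foldl (fun d e =>
       if PySem.Set.contains u0 e.2 then d
       else match pvKeyOf? e.2 with
       | some k' => d.insert k' (d.getD k' [] ++ [e])
       | none => d) d).getD k []
    = d.getD k [] ++ L.filter (fun e => !PySem.Set.contains u0 e.2 && pvKeyB e.2 k) := by
  induction L generalizing d with
  | nil => simp
  | cons e L ih =>
    rw [List.foldl_cons, List.filter_cons]
    by_cases h0 : PySem.Set.contains u0 e.2 = true
    · rw [if_pos h0, ih]
      have hf : (!PySem.Set.contains u0 e.2 && pvKeyB e.2 k) = false := by rw [h0]; rfl
      rw [hf]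
      simp
    · have h0' : PySem.Set.contains u0 e.2 = false := by simpa using h0
      rw [if_neg h0]
      have hfe : (!PySem.Set.contains u0 e.2 && pvKeyB e.2 k) = pvKeyB e.2 k := by rw [h0']; rfl
      rw [hfe]
      cases hk : pvKeyOf? e.2 with
      | none =>
        rw [show (match (none : Option String) with
            | some k'' => d.insert k'' (d.getD k'' [] ++ [e])
            | none => d) = d from rfl, ih]
        have hkb : pvKeyB e.2 k = false := by simp [pvKeyB, hk]
        rw [hkb]
        simp
      | some k' =>
        rw [show (match (some k' : Option String) with
            | some k'' => d.insert k'' (d.getD k'' [] ++ [e])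
            | none => d) = d.insert k' (d.getD k' [] ++ [e]) from rfl, ih, PySem.Dict.getD_insert]
        by_cases hkk : k = k'
        · subst hkk
          simp [pvKeyB, hk]
        · have hne : (k' == k) = false := by simpa using Ne.symm hkk
          simp [pvKeyB, hk, hne, hkk]

lemma pvB_buckets_getD (fr : List (List String)) (u0 : PySem.Set (List String)) (k : String) :
    (pvB_buckets fr u0).getD k []
    = (PySem.List.enumerate fr 0).filter (fun e => !PySem.Set.contains u0 e.2 && pvKeyB e.2 k) := by
  unfold pvB_buckets
  simp only [pvB_buckets_fn]
  rw [pvBuckets_fold]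
  simp

lemma pv_fst_ge {p : Int × List String} {xs : List (List String)} {s : Int}
    (h : p ∈ PySem.List.enumerate xs s) : s ≤ p.1 := by
  rw [PySem.List.mem_enumerate_iff] at h
  obtain ⟨k, hk, rfl⟩ := h
  simp

lemma pv_fold_keep (cand : String → Option (Int × List String)) (x : Int × List String)
    (hb : ∀ ci y, cand ci = some y → y = x ∨ x.1 < y.1) (cs : List String) :
    cs.foldl (fun best ci => pvComb best (cand ci)) (some x) = some x := by
  induction cs with
  | nil => rfl
  | cons ci cs ih =>
    rw [List.foldl_cons]
    cases hc : cand ci with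
    | none => rw [pvComb_none]; exact ih
    | some e =>
      rcases hb ci e hc with rfl | hlt
      · rw [pvComb_some_some, if_neg (lt_irrefl _)]
        exact ih
      · have hnl : ¬ e.1 < x.1 := by omega
        rw [pvComb_some_some, if_neg hnl]
        exact ih

lemma pv_fold_hit (cand : String → Option (Int × List String)) (x : Int × List String)
    (hb : ∀ ci y, cand ci = some y → y = x ∨ x.1 < y.1) :
    ∀ (cs : List String) (acc : Option (Int × List String)),
    (∃ ci ∈ cs, cand ci = some x) →
    (acc = none ∨ acc = some x ∨ ∃ y, acc = some y ∧ x.1 < y.1) →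
    cs.foldl (fun best ci => pvComb best (cand ci)) acc = some x := by
  intro cs
  induction cs with
  | nil => rintro acc ⟨ci, h, _⟩ _; exact absurd h (List.not_mem_nil)
  | cons ci cs ih =>
    rintro acc hhit hacc
    rw [List.foldl_cons]
    cases hc : cand ci with
    | none =>
      rw [pvComb_none]
      rcases hhit with ⟨cj, hcj, hjx⟩
      rcases List.mem_cons.mp hcj with rfl | hmem
      · exact absurd hjx (by simp [hc])
      · exact ih acc ⟨cj, hmem, hjx⟩ hacc
    | some e =>
      rcases hb ci e hc with rfl | hlt
      · -- the candidate here is x itself: the accumulator becomes x and stays x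
        rcases hacc with rfl | rfl | ⟨y, rfl, hy⟩
        · rw [pvComb_none_some]
          exact pv_fold_keep cand e hb cs
        · rw [pvComb_some_some, if_neg (lt_irrefl _)]
          exact pv_fold_keep cand e hb cs
        · rw [pvComb_some_some, if_pos hy]
          exact pv_fold_keep cand e hb cs
      · -- a strictly later candidate: the invariant is kept and the hit is in cs
        have hhit' : ∃ cj ∈ cs, cand cj = some x := by
          rcases hhit with ⟨cj, hcj, hjx⟩
          rcases List.mem_cons.mp hcj with rfl | hmem
          · rw [hc] at hjx; cases hjx; omega
          · exact ⟨cj, hmem, hjx⟩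
        rcases hacc with rfl | rfl | ⟨y, rfl, hy⟩
        · rw [pvComb_none_some]
          exact ih (some e) hhit' (Or.inr (Or.inr ⟨e, rfl, hlt⟩))
        · have hnl : ¬ e.1 < x.1 := by omega
          rw [pvComb_some_some, if_neg hnl]
          exact ih (some x) hhit' (Or.inr (Or.inl rfl))
        · by_cases hey : e.1 < y.1
          · rw [pvComb_some_some, if_pos hey]
            exact ih (some e) hhit' (Or.inr (Or.inr ⟨e, rfl, hlt⟩))
          · rw [pvComb_some_some, if_neg hey]
            exact ih (some y) hhit' (Or.inr (Or.inr ⟨y, rfl, hy⟩))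

lemma pv_sel_enum (used : PySem.Set (List String)) :
    ∀ (fr : List (List String)) (s : Int) (current : List String),
    current.foldl (fun best ci =>
      pvComb best ((PySem.List.enumerate fr s).find? (fun e => pvKeyB e.2 ci && !PySem.Set.contains used e.2))) none
    = (PySem.List.enumerate fr s).find? (fun e => !PySem.Set.contains used e.2 && pvAny current e.2) := by
  intro fr
  induction fr with
  | nil =>
    intro s current
    have hfn : (fun (best : Option (Int × List String)) (ci : String) =>
        pvComb best ((PySem.List.enumerate ([] : List (List String)) s).find?
          (fun e => pvKeyB e.2 ci && !PySem.Set.contains used e.2)))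
        = fun best _ => best := by
      funext best ci
      simp [PySem.List.enumerate_nil, pvComb]
    rw [hfn, PySem.List.foldl_ignore]
    simp [PySem.List.enumerate_nil]
  | cons t fr ih =>
    intro s current
    rw [PySem.List.enumerate_cons]
    by_cases hskip : (!PySem.Set.contains used t && pvAny current t) = false
    · -- the head matches neither side: peel it off everywhere and use the IH
      rw [List.find?_cons_of_neg (p := fun e : Int × List String => !PySem.Set.contains used e.2 && pvAny current e.2)
        (by show ¬ ((!PySem.Set.contains used t && pvAny current t) = true)
            rw [hskip]; exact Bool.false_ne_true)]
      have hfalse : ∀ ci ∈ current, (pvKeyB t ci && !PySem.Set.contains used t) = false := by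
        intro ci hci
        cases hk : pvKeyOf? t with
        | none => simp [pvKeyB, hk]
        | some k =>
          rcases Bool.and_eq_false_iff.mp hskip with h1 | h2
          · have hmem : t ∈ used := by simpa using h1
            simp [hmem]
          · simp only [pvAny, hk] at h2
            have hne : (k == ci) = false := by
              by_cases hkci : k = ci
              · subst hkci
                have : k ∉ current := by simpa using h2
                exact absurd hci this
              · simpa using hkci
            simp [pvKeyB, hk, hne]
      refine Eq.trans ?_ (ih (s + 1) current)
      apply PySem.List.foldl_congr_mem
      intro best ci hci
      rw [List.find?_cons_of_neg (p := fun e : Int × List String => pvKeyB e.2 ci && !PySem.Set.contains used e.2)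
        (by show ¬ ((pvKeyB t ci && !PySem.Set.contains used t) = true)
            rw [hfalse ci hci]; exact Bool.false_ne_true)]
    · -- the head matches: A returns it, and B's fold settles on position s
      have hhead : (!PySem.Set.contains used t && pvAny current t) = true := by
        simpa using hskip
      rw [List.find?_cons_of_pos (p := fun e : Int × List String => !PySem.Set.contains used e.2 && pvAny current e.2)
        (by show (!PySem.Set.contains used t && pvAny current t) = true; exact hhead)]
      obtain ⟨hu, hany⟩ := Bool.and_eq_true_iff.mp hhead
      cases hk : pvKeyOf? t with
      | none => simp [pvAny, hk] at hany
      | some k =>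
        have hkc : k ∈ current := by
          simp only [pvAny, hk] at hany
          exact List.mem_of_elem_eq_true hany
        apply pv_fold_hit
        · -- every candidate is the head itself or strictly later in the file
          intro ci y hy
          rcases List.mem_cons.mp (List.mem_of_find?_eq_some hy) with rfl | hm
          · exact Or.inl rfl
          · have hge := pv_fst_ge hm
            right
            show (s, t).1 < y.1
            simp only []
            omega
        · -- the bucket of k yields the head
          refine ⟨k, hkc, ?_⟩
          rw [List.find?_cons_of_pos (p := fun e : Int × List String => pvKeyB e.2 k && !PySem.Set.contains used e.2)
            (by show (pvKeyB t k && !PySem.Set.contains used t) = true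
                have hnm : t ∉ used := by simpa using hu
                simp [pvKeyB, hk, hnm])]
        · exact Or.inl rfl

lemma pv_stepB_eq (fr : List (List String)) (u0 used : PySem.Set (List String)) (current : List String)
    (hsub : ∀ x ∈ u0, x ∈ used) :
    pvB_step (pvB_buckets fr u0) used current
    = (PySem.List.enumerate fr 0).find? (fun e => !PySem.Set.contains used e.2 && pvAny current e.2) := by
  unfold pvB_step
  have hf : (fun (best : Option (Int × List String)) (ci : String) =>
      match ((pvB_buckets fr u0).getD ci []).find? (fun e => !PySem.Set.contains used e.2) with
      | none => best
      | some e => match best with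
        | none => some e
        | some b => if e.1 < b.1 then some e else some b)
    = (fun best ci =>
      pvComb best ((PySem.List.enumerate fr 0).find?
        (fun e => pvKeyB e.2 ci && !PySem.Set.contains used e.2))) := by
    funext best ci
    rw [pvB_buckets_getD, List.find?_filter]
    have hp : (fun (e : Int × List String) =>
        decide ((!PySem.Set.contains u0 e.2 && pvKeyB e.2 ci) = true ∧ (!PySem.Set.contains used e.2) = true))
        = (fun e => pvKeyB e.2 ci && !PySem.Set.contains used e.2) := by
      funext e
      by_cases h0 : e.2 ∈ u0
      · -- pre-used tuples are used throughout, so both sides are false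
        have hu : e.2 ∈ used := hsub e.2 h0
        simp [h0, hu]
      · simp [h0]
    rw [hp]
    rfl
  rw [hf, pv_sel_enum]

lemma pv_findA_enum (p : List String → Bool) :
    ∀ (fr : List (List String)) (s : Int),
    fr.find? p = ((PySem.List.enumerate fr s).find? (fun e => p e.2)).map (·.2) := by
  intro fr
  induction fr with
  | nil => intro s; rfl
  | cons t fr ih =>
    intro s
    rw [PySem.List.enumerate_cons]
    by_cases h : p t
    · rw [List.find?_cons_of_pos h, List.find?_cons_of_pos (by simpa using h)]
      rfl
    · rw [List.find?_cons_of_neg h, List.find?_cons_of_neg (by simpa using h)]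
      exact ih (s + 1)

lemma pv_step_eq (fr : List (List String)) (u0 used : PySem.Set (List String)) (current : List String)
    (hsub : ∀ x ∈ u0, x ∈ used) :
    fr.find? (pvA_match used current) = (pvB_step (pvB_buckets fr u0) used current).map (·.2) := by
  rw [pv_findA_enum (pvA_match used current) fr 0, pv_stepB_eq fr u0 used current hsub]
  have hp : (fun (e : Int × List String) => pvA_match used current e.2)
      = fun e => !PySem.Set.contains used e.2 && pvAny current e.2 := by
    funext e
    exact pvA_match_eq used current e.2
  rw [hp]

lemma pv_loop_eq (fr : List (List String)) (u0 : PySem.Set (List String)) :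
    ∀ (fuel : Nat) (used : PySem.Set (List String)) (current chain : List String),
    (∀ x ∈ u0, x ∈ used) →
    pvA_loop fr fuel used current chain = pvB_loop (pvB_buckets fr u0) fuel used current chain := by
  intro fuel
  induction fuel with
  | zero => intro used current chain _; rfl
  | succ n ih =>
    intro used current chain hsub
    simp only [pvA_loop, pvB_loop]
    rw [pv_step_eq fr u0 used current hsub]
    cases h : pvB_step (pvB_buckets fr u0) used current with
    | none => rfl
    | some e =>
      exact ih _ _ _ (fun x hx => (PySem.Set.mem_add _ _ _).mpr (Or.inl (hsub x hx)))

-- ===== VERDICT (by name: the statement is the Claim_ definition above) =====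
theorem find_coref_chain_spec : Claim_equal_find_coref_chain := by
  intro st fr ui _ _
  show find_coref_chain st fr ui = find_coref_chain_alt st fr ui
  exact pv_loop_eq fr ui (fr.length + 1) ui (pvA_corefs (st.getD 2 "")) [st.getD 0 ""] (fun _ hx => hx)
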